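-- pv_equiv track=rewrite | github.com/norchcode/ai-qa-agent | src/visual_testing.py | _extract_ui_ux_issues_from_text
-- ===== SOURCE A (Python) =====
-- from typing import Dict, List, Any, Optional, Union, Tuple
--
-- def _extract_ui_ux_issues_from_text(text: str) -> List[Dict[str, Any]]:
--     """
--     Extract UI/UX issues from text output when JSON parsing fails.
--
--     Args:
--         text: The text output from the LLM.
--
--     Returns:
--         List of UI/UX issues extracted from the text.
--     """
--     ui_ux_issues = []
--     current_issue = {}
--
--     for line in text.split('\n'):
--         line = line.strip()
--         if not line:
--             continue
--
--         if line.startswith('Issue') or line.startswith('UI/UX Issue') or line.startswith('-'):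
--             if current_issue and 'description' in current_issue:
--                 ui_ux_issues.append(current_issue)
--             current_issue = {'description': line}
--         elif 'severity' in line.lower():
--             for severity in ['low', 'medium', 'high']:
--                 if severity in line.lower():
--                     current_issue['severity'] = severity.capitalize()
--                     break
--         elif 'aspect' in line.lower() or 'affected' in line.lower():
--             for aspect in ['usability', 'accessibility', 'consistency', 'clarity', 'efficiency']:
--                 if aspect in line.lower():
--                     current_issue['aspect'] = aspect.capitalize()
--                     break
--         elif 'fix' in line.lower() or 'suggestion' in line.lower():
--             current_issue['suggestion'] = line
--
--     if current_issue and 'description' in current_issue: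
--         ui_ux_issues.append(current_issue)
--
--     return ui_ux_issues if ui_ux_issues else [{"description": text}]
-- ===== SOURCE B (Python) =====
-- from typing import Dict, List, Any
--
--
-- def _is_start(line: str) -> bool:
--     return line.startswith('Issue') or line.startswith('UI/UX Issue') or line.startswith('-')
--
--
-- def _classify(issue: Dict[str, Any], line: str) -> None:
--     low = line.lower()
--     if 'severity' in low:
--         for severity in ['low', 'medium', 'high']:
--             if severity in low:
--                 issue['severity'] = severity.capitalize()
--                 break
--     elif 'aspect' in low or 'affected' in low:
--         for aspect in ['usability', 'accessibility', 'consistency', 'clarity', 'efficiency']: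
--             if aspect in low:
--                 issue['aspect'] = aspect.capitalize()
--                 break
--     elif 'fix' in low or 'suggestion' in low:
--         issue['suggestion'] = line
--
--
-- def _extract_ui_ux_issues_from_text(text: str) -> List[Dict[str, Any]]:
--     lines = [l for l in (raw.strip() for raw in text.split('\n')) if l]
--     # discard everything before the first block-start line
--     while lines and not _is_start(lines[0]):
--         lines = lines[1:]
--     issues = []
--     while lines:
--         head, rest = lines[0], lines[1:]
--         body = []
--         while rest and not _is_start(rest[0]):
--             body.append(rest[0])
--             rest = rest[1:]
--         issue = {'description': head}
--         for line in body:
--             _classify(issue, line)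
--         issues.append(issue)
--         lines = rest
--     return issues if issues else [{"description": text}]
-- ===== Notes on version B (the rewrite author's own statement) =====
-- stated objective: alternative
-- what changed: A's single stateful pass with a mutable current-issue dict and flush-on-start logic is replaced by a two-phase pipeline: strip/filter the lines, drop the headerless prefix, partition the rest into blocks at start lines, and build each issue dict independently from its block.
import Mathlib
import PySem

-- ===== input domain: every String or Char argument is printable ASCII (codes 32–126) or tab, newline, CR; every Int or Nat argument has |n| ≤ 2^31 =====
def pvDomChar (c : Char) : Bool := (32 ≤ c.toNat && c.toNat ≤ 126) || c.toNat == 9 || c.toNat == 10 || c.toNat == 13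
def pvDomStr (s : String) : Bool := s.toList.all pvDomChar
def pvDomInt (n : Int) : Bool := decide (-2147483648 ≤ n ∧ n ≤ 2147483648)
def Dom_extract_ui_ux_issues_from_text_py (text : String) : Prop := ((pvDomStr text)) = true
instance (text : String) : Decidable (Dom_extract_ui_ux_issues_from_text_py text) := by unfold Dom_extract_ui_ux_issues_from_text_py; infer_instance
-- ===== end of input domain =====

-- One honest line: B re-decomposes A's single stateful line loop into an explicit two-phase
-- pipeline (drop the headerless prefix, then split the lines into blocks at start lines and
-- build each issue dict per block); same values, alternative structure, no speed claim.


-- hand port of Python str.capitalize (no PySem primitive); exact on the ASCII strings it is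
-- applied to here (the literal lowercase words of the two candidate lists)
def pvCap (s : String) : String :=
  String.ofList (match s.toList with
    | [] => []
    | c :: cs => PySem.Chars.upperChar c :: cs.map PySem.Chars.lowerChar)

-- ===== PORT A =====
-- A's loop body: strip, skip empty, flush-and-restart on a start line, else the elif chain
def pvStepA (st : List (PySem.Dict String String) × PySem.Dict String String) (rawLine : String) :
    List (PySem.Dict String String) × PySem.Dict String String :=
  let line := PySem.Str.strip rawLine
  if line = "" then st
  else if PySem.Str.startswith line "Issue" || PySem.Str.startswith line "UI/UX Issue" ||
      PySem.Str.startswith line "-" then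
    ((if !st.2.items.isEmpty && st.2.contains "description" then st.1 ++ [st.2] else st.1),
     PySem.Dict.empty.insert "description" line)
  else if PySem.Str.isIn "severity" (PySem.Str.lower line) then
    (st.1, match ["low", "medium", "high"].find?
        (fun s => PySem.Str.isIn s (PySem.Str.lower line)) with
      | some s => st.2.insert "severity" (pvCap s)
      | none => st.2)
  else if PySem.Str.isIn "aspect" (PySem.Str.lower line) ||
      PySem.Str.isIn "affected" (PySem.Str.lower line) then
    (st.1, match ["usability", "accessibility", "consistency", "clarity", "efficiency"].find?
        (fun a => PySem.Str.isIn a (PySem.Str.lower line)) with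
      | some a => st.2.insert "aspect" (pvCap a)
      | none => st.2)
  else if PySem.Str.isIn "fix" (PySem.Str.lower line) ||
      PySem.Str.isIn "suggestion" (PySem.Str.lower line) then
    (st.1, st.2.insert "suggestion" line)
  else st

def extract_ui_ux_issues_from_text_py (text : String) : List (List (String × String)) :=
  let st := ((PySem.Str.split? text "\n").getD []).foldl pvStepA ([], PySem.Dict.empty)
  let issues := if !st.2.items.isEmpty && st.2.contains "description" then st.1 ++ [st.2] else st.1
  if issues.isEmpty then [[("description", text)]] else issues.map (fun d => d.items)

-- ===== PORT B =====
def pvIsStart (line : String) : Bool :=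
  PySem.Str.startswith line "Issue" || PySem.Str.startswith line "UI/UX Issue" ||
    PySem.Str.startswith line "-"

-- B's _classify helper: the elif chain on one body line
def pvClassify (issue : PySem.Dict String String) (line : String) : PySem.Dict String String :=
  if PySem.Str.isIn "severity" (PySem.Str.lower line) then
    match ["low", "medium", "high"].find?
        (fun s => PySem.Str.isIn s (PySem.Str.lower line)) with
    | some s => issue.insert "severity" (pvCap s)
    | none => issue
  else if PySem.Str.isIn "aspect" (PySem.Str.lower line) ||
      PySem.Str.isIn "affected" (PySem.Str.lower line) then
    match ["usability", "accessibility", "consistency", "clarity", "efficiency"].find?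
        (fun a => PySem.Str.isIn a (PySem.Str.lower line)) with
    | some a => issue.insert "aspect" (pvCap a)
    | none => issue
  else if PySem.Str.isIn "fix" (PySem.Str.lower line) ||
      PySem.Str.isIn "suggestion" (PySem.Str.lower line) then
    issue.insert "suggestion" line
  else issue

-- B's block loop: one issue per start line, its body = the following non-start lines
def pvBlocks : List String → List (PySem.Dict String String)
  | [] => []
  | head :: rest =>
    ((rest.takeWhile (fun l => !pvIsStart l)).foldl pvClassify
        (PySem.Dict.empty.insert "description" head))
      :: pvBlocks (rest.dropWhile (fun l => !pvIsStart l))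
termination_by l => l.length
decreasing_by
  exact Nat.lt_succ_of_le (List.length_dropWhile_le _ _)

def extract_ui_ux_issues_from_text_py_alt (text : String) : List (List (String × String)) :=
  let lines := (((PySem.Str.split? text "\n").getD []).map PySem.Str.strip).filter
    (fun l => l ≠ "")
  let issues := pvBlocks (lines.dropWhile (fun l => !pvIsStart l))
  if issues.isEmpty then [[("description", text)]] else issues.map (fun d => d.items)

-- ===== PRECONDITION & SPEC =====
def Spec_extract_ui_ux_issues_from_text_py (text : String) (out : List (List (String × String))) : Prop := out = extract_ui_ux_issues_from_text_py_alt text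
instance (text : String) (out : List (List (String × String))) : Decidable (Spec_extract_ui_ux_issues_from_text_py text out) := by unfold Spec_extract_ui_ux_issues_from_text_py; infer_instance

-- ===== CLAIM (what is proved, stated in full; the proofs are below) =====
def Claim_equal_extract_ui_ux_issues_from_text_py : Prop := ∀ (text : String), Dom_extract_ui_ux_issues_from_text_py text → Spec_extract_ui_ux_issues_from_text_py text (extract_ui_ux_issues_from_text_py text)

-- ===== LEMMAS AND PROOFS =====

-- A's step on an already-stripped nonempty line (proof-only restatement of pvStepA)
def pvCoreA (st : List (PySem.Dict String String) × PySem.Dict String String) (line : String) :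
    List (PySem.Dict String String) × PySem.Dict String String :=
  if pvIsStart line then
    ((if !st.2.items.isEmpty && st.2.contains "description" then st.1 ++ [st.2] else st.1),
     PySem.Dict.empty.insert "description" line)
  else (st.1, pvClassify st.2 line)

def pvFlush (st : List (PySem.Dict String String) × PySem.Dict String String) :
    List (PySem.Dict String String) :=
  if !st.2.items.isEmpty && st.2.contains "description" then st.1 ++ [st.2] else st.1

lemma pvStepA_eq (st : List (PySem.Dict String String) × PySem.Dict String String)
    (raw : String) :
    pvStepA st raw =
      if PySem.Str.strip raw = "" then st else pvCoreA st (PySem.Str.strip raw) := by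
  simp only [pvStepA, pvCoreA, pvClassify, pvIsStart]
  by_cases h0 : PySem.Str.strip raw = ""
  · simp [h0]
  · simp only [h0, if_false]
    split_ifs <;> simp_all

lemma foldl_stepA_eq (raws : List String)
    (st : List (PySem.Dict String String) × PySem.Dict String String) :
    raws.foldl pvStepA st =
      ((raws.map PySem.Str.strip).filter (fun l => l ≠ "")).foldl pvCoreA st := by
  induction raws generalizing st with
  | nil => rfl
  | cons r rs ih =>
    simp only [List.foldl_cons, List.map_cons, List.filter_cons, pvStepA_eq]
    by_cases h : PySem.Str.strip r = "" <;> simp [h, ih]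

lemma pvClassify_contains_desc (c : PySem.Dict String String) (l : String) :
    (pvClassify c l).contains "description" = c.contains "description" := by
  simp only [pvClassify]
  split_ifs <;> (try split) <;> simp [PySem.Dict.contains_insert]

lemma pvClassify_items_ne (c : PySem.Dict String String) (l : String)
    (h : c.items.isEmpty = false) : (pvClassify c l).items.isEmpty = false := by
  simp only [pvClassify]
  split_ifs <;> (try split) <;>
    simp_all [PySem.Dict.items_insert] <;>
    split <;> simp_all

lemma pvStartDict_flag (l : String) :
    (!(PySem.Dict.empty.insert "description" l).items.isEmpty &&
      (PySem.Dict.empty.insert "description" l).contains "description") = true := by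
  simp [PySem.Dict.items_insert]

lemma pvRun_with_desc (L : List String) (issues : List (PySem.Dict String String))
    (cur : PySem.Dict String String)
    (h : (!cur.items.isEmpty && cur.contains "description") = true) :
    pvFlush (L.foldl pvCoreA (issues, cur)) =
      issues ++ ((L.takeWhile (fun l => !pvIsStart l)).foldl pvClassify cur)
        :: pvBlocks (L.dropWhile (fun l => !pvIsStart l)) := by
  induction L generalizing issues cur with
  | nil => simp [pvFlush, pvBlocks, h]
  | cons l ls ih =>
    by_cases hs : pvIsStart l
    · have hc : pvCoreA (issues, cur) l =
          (issues ++ [cur], PySem.Dict.empty.insert "description" l) := by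
        simp [pvCoreA, hs, h]
      rw [List.foldl_cons, hc, ih (issues ++ [cur]) _ (pvStartDict_flag l)]
      simp [pvBlocks, hs]
    · have h' : (!(pvClassify cur l).items.isEmpty &&
          (pvClassify cur l).contains "description") = true := by
        rw [pvClassify_contains_desc]
        have := pvClassify_items_ne cur l (by simp_all)
        simp_all
      have hc : pvCoreA (issues, cur) l = (issues, pvClassify cur l) := by
        simp [pvCoreA, hs]
      rw [List.foldl_cons, hc, ih issues _ h']
      simp [hs]

lemma pvRun_no_desc (L : List String) (issues : List (PySem.Dict String String))
    (cur : PySem.Dict String String) (h : cur.contains "description" = false) :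
    pvFlush (L.foldl pvCoreA (issues, cur)) =
      issues ++ pvBlocks (L.dropWhile (fun l => !pvIsStart l)) := by
  induction L generalizing issues cur with
  | nil => simp [pvFlush, pvBlocks, h]
  | cons l ls ih =>
    by_cases hs : pvIsStart l
    · have hc : pvCoreA (issues, cur) l =
          (issues, PySem.Dict.empty.insert "description" l) := by
        simp [pvCoreA, hs, h]
      rw [List.foldl_cons, hc, pvRun_with_desc ls issues _ (pvStartDict_flag l)]
      simp [pvBlocks, hs]
    · have hc : pvCoreA (issues, cur) l = (issues, pvClassify cur l) := by
        simp [pvCoreA, hs]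
      rw [List.foldl_cons, hc, ih issues _ (by rw [pvClassify_contains_desc]; exact h)]
      simp [hs]

-- ===== VERDICT (by name: the statement is the Claim_ definition above) =====
theorem extract_ui_ux_issues_from_text_py_spec : Claim_equal_extract_ui_ux_issues_from_text_py := by
  intro text _
  unfold Spec_extract_ui_ux_issues_from_text_py
  unfold extract_ui_ux_issues_from_text_py extract_ui_ux_issues_from_text_py_alt
  rw [foldl_stepA_eq]
  have h := pvRun_no_desc
    ((((PySem.Str.split? text "\n").getD []).map PySem.Str.strip).filter (fun l => l ≠ ""))
    [] PySem.Dict.empty (by decide)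
  simp only [pvFlush] at h
  simp only [h, List.nil_append]
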